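-- pv_equiv track=rewrite | github.com/alexaoliveira2000/connect4 | connect4.py | update_sequence_counts
-- ===== SOURCE A (Python) =====
-- def update_sequence_counts(line, player, sequence_counts):
--     current_count = 0
--     for cell in line:
--         if cell == player:
--             current_count += 1
--             if current_count >= 2:
--                 sequence_counts[current_count] = sequence_counts.get(current_count, 0) + 1
--         else:
--             current_count = 0
--     return sequence_counts
-- ===== SOURCE B (Python) =====
-- def update_sequence_counts(line, player, sequence_counts):
--     # run-length pass: collect maximal runs of the player's cells, then count
--     runs = []
--     run = 0
--     for cell in line:
--         if cell == player:
--             run += 1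
--         else:
--             if run > 0:
--                 runs.append(run)
--             run = 0
--     if run > 0:
--         runs.append(run)
--     for length in runs:
--         for k in range(2, length + 1):
--             sequence_counts[k] = sequence_counts.get(k, 0) + 1
--     return sequence_counts
-- ===== Notes on version B (the rewrite author's own statement) =====
-- stated objective: alternative
-- what changed: Replaces the per-cell incremental dict update with a two-phase run-length decomposition: first collect the maximal runs of the player's cells, then for each run of length L bump the counters for keys 2..L.
import Mathlib
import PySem

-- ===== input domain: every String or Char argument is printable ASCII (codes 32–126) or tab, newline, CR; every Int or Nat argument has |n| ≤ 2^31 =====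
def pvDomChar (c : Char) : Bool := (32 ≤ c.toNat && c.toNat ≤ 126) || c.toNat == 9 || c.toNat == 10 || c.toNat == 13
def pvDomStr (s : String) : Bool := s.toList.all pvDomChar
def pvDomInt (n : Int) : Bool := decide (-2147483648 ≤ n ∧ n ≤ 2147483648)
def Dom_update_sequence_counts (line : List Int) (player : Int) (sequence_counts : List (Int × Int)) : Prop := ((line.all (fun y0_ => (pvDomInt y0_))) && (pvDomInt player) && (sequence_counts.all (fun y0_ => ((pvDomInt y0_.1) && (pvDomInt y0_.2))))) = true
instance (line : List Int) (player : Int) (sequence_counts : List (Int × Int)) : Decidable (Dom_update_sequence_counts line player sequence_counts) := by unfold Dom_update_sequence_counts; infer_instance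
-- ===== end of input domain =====

-- B replaces A's per-cell incremental dict update with a two-phase run-length
-- decomposition (collect maximal runs, then bump counters 2..L per run); same cost.


-- ===== PORT A =====
-- A: one pass; a running count, and on every cell of the player with count ≥ 2
-- increment sequence_counts[count].
def update_sequence_counts (line : List Int) (player : Int) (sequence_counts : List (Int × Int)) : List (Int × Int) :=
  (line.foldl
    (fun (st : Int × PySem.Dict Int Int) cell =>
      if cell = player then
        let c := st.1 + 1
        (c, if 2 ≤ c then st.2.insert c (st.2.getD c 0 + 1) else st.2)
      else (0, st.2))
    (0, PySem.Dict.mk sequence_counts)).2.items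

-- ===== PORT B =====
-- B: first pass collects the maximal run lengths of the player's cells,
-- second pass bumps counters 2..L for each run L.
def update_sequence_counts_alt (line : List Int) (player : Int) (sequence_counts : List (Int × Int)) : List (Int × Int) :=
  let st := line.foldl
    (fun (st : List Int × Int) cell =>
      if cell = player then (st.1, st.2 + 1)
      else ((if 0 < st.2 then st.1 ++ [st.2] else st.1), 0))
    ([], 0)
  let runs := if 0 < st.2 then st.1 ++ [st.2] else st.1
  (runs.foldl
    (fun d L => (PySem.List.pyRange 2 (L + 1) 1).foldl
      (fun d k => d.insert k (d.getD k 0 + 1)) d)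
    (PySem.Dict.mk sequence_counts)).items

-- ===== PRECONDITION & SPEC =====
def Spec_update_sequence_counts (line : List Int) (player : Int) (sequence_counts : List (Int × Int)) (out : List (Int × Int)) : Prop := out = update_sequence_counts_alt line player sequence_counts
instance (line : List Int) (player : Int) (sequence_counts : List (Int × Int)) (out : List (Int × Int)) : Decidable (Spec_update_sequence_counts line player sequence_counts out) := by unfold Spec_update_sequence_counts; infer_instance

-- ===== CLAIM (what is proved, stated in full; the proofs are below) =====
def Claim_equal_update_sequence_counts : Prop := ∀ (line : List Int) (player : Int) (sequence_counts : List (Int × Int)), Dom_update_sequence_counts line player sequence_counts → Spec_update_sequence_counts line player sequence_counts (update_sequence_counts line player sequence_counts)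

-- ===== LEMMAS AND PROOFS =====

-- the shared counter bump
def pvStep (d : PySem.Dict Int Int) (k : Int) : PySem.Dict Int Int :=
  d.insert k (d.getD k 0 + 1)

-- the keys A bumps, in order, starting from running count c
def pvKeysA (player : Int) : List Int → Int → List Int
  | [], _ => []
  | x :: xs, c =>
    if x = player then (if 2 ≤ c + 1 then [c + 1] else []) ++ pvKeysA player xs (c + 1)
    else pvKeysA player xs 0

def pvFinish (s : List Int × Int) : List Int := if 0 < s.2 then s.1 ++ [s.2] else s.1

-- the keys B bumps for a list of runs
def pvFlat (rs : List Int) : List Int := rs.flatMap (fun L => PySem.List.pyRange 2 (L + 1) 1)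

theorem pvAloop_eq (player : Int) (xs : List Int) :
    ∀ (c : Int) (d : PySem.Dict Int Int),
    (xs.foldl
      (fun (st : Int × PySem.Dict Int Int) cell =>
        if cell = player then
          let c := st.1 + 1
          (c, if 2 ≤ c then st.2.insert c (st.2.getD c 0 + 1) else st.2)
        else (0, st.2)) (c, d)).2
    = (pvKeysA player xs c).foldl pvStep d := by
  induction xs with
  | nil => intro c d; simp [pvKeysA]
  | cons x xs ih =>
    intro c d
    by_cases hx : x = player
    · by_cases h2 : 2 ≤ c + 1 <;>
        simp [pvKeysA, hx, h2, ih, pvStep]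
    · simp [pvKeysA, hx, ih]

theorem pvRuns_keys (player : Int) (xs : List Int) :
    ∀ (acc : List Int) (r : Int), 0 ≤ r →
    pvFlat (pvFinish (xs.foldl
        (fun (st : List Int × Int) cell =>
          if cell = player then (st.1, st.2 + 1)
          else ((if 0 < st.2 then st.1 ++ [st.2] else st.1), 0)) (acc, r)))
    = pvFlat acc ++ PySem.List.pyRange 2 (r + 1) 1 ++ pvKeysA player xs r := by
  induction xs with
  | nil =>
    intro acc r hr
    by_cases h : 0 < r
    · simp [pvFlat, pvKeysA, pvFinish, h]
    · have : r = 0 := by omega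
      simp [pvFlat, pvKeysA, pvFinish, this, PySem.List.pyRange_one_eq_nil (by omega : (1:Int) ≤ 2)]
  | cons x xs ih =>
    intro acc r hr
    by_cases hx : x = player
    · have hsplit : PySem.List.pyRange 2 (r + 1 + 1) 1
          = PySem.List.pyRange 2 (r + 1) 1 ++ (if 2 ≤ r + 1 then [r + 1] else []) := by
        by_cases h1 : 2 ≤ r + 1
        · rw [if_pos h1, PySem.List.pyRange_one_succ_right (by omega : (2:Int) ≤ r + 1)]
        · have : r = 0 := by omega
          subst this
          have e1 : PySem.List.pyRange (2:Int) (0 + 1 + 1) 1 = [] :=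
            PySem.List.pyRange_one_eq_nil (by omega)
          have e2 : PySem.List.pyRange (2:Int) (0 + 1) 1 = [] :=
            PySem.List.pyRange_one_eq_nil (by omega)
          rw [if_neg h1, e1, e2]
          rfl
      simp only [List.foldl_cons]
      rw [if_pos hx, ih acc (r + 1) (by omega), hsplit]
      simp [pvKeysA, hx]
    · have hz : PySem.List.pyRange (2:Int) (0 + 1) 1 = [] :=
        PySem.List.pyRange_one_eq_nil (by omega)
      simp only [List.foldl_cons]
      rw [if_neg hx, ih (if 0 < r then acc ++ [r] else acc) 0 le_rfl, hz]
      by_cases hrpos : 0 < r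
      · simp [pvKeysA, hx, pvFlat, hrpos]
      · have : r = 0 := by omega
        subst this
        simp [pvKeysA, hx, pvFlat]

theorem pvFoldl_flat (rs : List Int) :
    ∀ d : PySem.Dict Int Int,
    rs.foldl (fun d L => (PySem.List.pyRange 2 (L + 1) 1).foldl
      (fun d k => d.insert k (d.getD k 0 + 1)) d) d
    = (pvFlat rs).foldl pvStep d := by
  induction rs with
  | nil => intro d; simp [pvFlat]
  | cons L rs ih =>
    intro d
    have hf : pvFlat (L :: rs) = PySem.List.pyRange 2 (L + 1) 1 ++ pvFlat rs := by
      simp [pvFlat]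
    rw [List.foldl_cons, ih, hf, List.foldl_append]
    rfl

-- ===== VERDICT (by name: the statement is the Claim_ definition above) =====
theorem update_sequence_counts_spec : Claim_equal_update_sequence_counts := by
  intro line player sc _
  unfold Spec_update_sequence_counts update_sequence_counts update_sequence_counts_alt
  dsimp only
  rw [pvAloop_eq, pvFoldl_flat]
  have h := pvRuns_keys player line [] 0 le_rfl
  simp only [pvFinish, pvFlat, List.flatMap_nil, List.nil_append,
    PySem.List.pyRange_one_eq_nil (by omega : (0:Int) + 1 ≤ 2)] at h ⊢
  rw [h]
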